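-- pv_equiv track=rewrite | github.com/DarshanJain-07/Firewall | firewall.py | is_trusted_ip
-- ===== SOURCE A (Python) =====
-- import ipaddress
--
-- TRUSTED_IPS = {
--     "192.168.1.1",
--     "192.168.1.100",
--     "127.0.0.1",
--     "192.168.0.0/16",  # Corporate subnet example
--     "10.0.0.0/8"       # Private network example
-- }
--
-- def is_trusted_ip(ip):
--     """Check if IP is in trusted list (supports both individual IPs and CIDR subnets)."""
--     try:
--         ip_obj = ipaddress.ip_address(ip)
--         for trusted in TRUSTED_IPS:
--             if '/' in trusted:  # CIDR subnet
--                 if ip_obj in ipaddress.ip_network(trusted, strict=False):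
--                     return True
--             else:  # Individual IP
--                 if ip == trusted:
--                     return True
--         return False
--     except ValueError:
--         return False
-- ===== SOURCE B (Python) =====
-- TRUSTED_IPS = {
--     "192.168.1.1",
--     "192.168.1.100",
--     "127.0.0.1",
--     "192.168.0.0/16",  # Corporate subnet example
--     "10.0.0.0/8"       # Private network example
-- }
--
-- def _oct(s):
--     """One dotted-quad octet (as ipaddress accepts it) -> int, else None."""
--     if s == "0":
--         return 0
--     if 1 <= len(s) <= 3 and s[0] != '0' and s.isdigit():
--         n = int(s)
--         if n <= 255:
--             return n
--     return None
--
-- def _ipv4_int(ip):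
--     """Dotted quad -> 32-bit int in ONE left-to-right character pass, or None.
--     (A valid IPv6 input parses in ipaddress but can never be trusted here.)"""
--     octets_done = 0
--     value = 0
--     cur = ""
--     for ch in ip:
--         if ch == '.':
--             n = _oct(cur)
--             if n is None or octets_done >= 3:
--                 return None
--             value = value * 256 + n
--             octets_done += 1
--             cur = ""
--         else:
--             cur += ch
--     n = _oct(cur)
--     if n is None or octets_done != 3:
--         return None
--     return value * 256 + n
--
-- def _cidr_range(s):
--     """'a.b.c.d/p' -> inclusive (lo, hi) address interval (strict=False masking)."""
--     base, _, plen = s.partition('/')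
--     size = 1 << (32 - int(plen))
--     lo = _ipv4_int(base)
--     lo -= lo % size
--     return lo, lo + size - 1
--
-- # Partition done once at load: raw exact-IP strings vs. numeric address intervals.
-- EXACT_IPS = frozenset(s for s in TRUSTED_IPS if '/' not in s)
-- RANGES = [_cidr_range(s) for s in TRUSTED_IPS if '/' in s]
--
-- def is_trusted_ip(ip):
--     """Check if IP is in trusted list (supports both individual IPs and CIDR subnets)."""
--     v = _ipv4_int(ip)
--     if v is None:
--         return False
--     return ip in EXACT_IPS or any(lo <= v <= hi for lo, hi in RANGES)
-- ===== Notes on version B (the rewrite author's own statement) =====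
-- stated objective: alternative
-- what changed: A validates via ipaddress and, per call, loops over every trusted entry re-classifying it ('/' test) and re-parsing each CIDR string with ip_network; B partitions TRUSTED_IPS once at module load into a frozenset of raw exact-IP strings and precomputed inclusive (lo, hi) address intervals, validates the input with a single left-to-right character-scan dotted-quad parser to a 32-bit int, and answers with a set lookup plus interval comparisons (no ipaddress objects; valid IPv6 input can never be trusted here, so it falls out as unparsed).
import Mathlib
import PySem

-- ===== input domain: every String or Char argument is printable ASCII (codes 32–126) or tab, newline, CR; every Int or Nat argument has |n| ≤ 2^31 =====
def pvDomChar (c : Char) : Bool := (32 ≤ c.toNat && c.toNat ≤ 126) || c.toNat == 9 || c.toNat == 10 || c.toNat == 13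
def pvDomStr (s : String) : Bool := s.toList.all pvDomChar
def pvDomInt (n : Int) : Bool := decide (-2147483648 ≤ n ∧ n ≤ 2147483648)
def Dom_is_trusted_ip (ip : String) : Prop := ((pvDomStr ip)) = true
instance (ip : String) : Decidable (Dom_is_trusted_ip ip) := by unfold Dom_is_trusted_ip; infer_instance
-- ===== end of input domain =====

-- B replaces A's per-call classify-and-reparse loop by a load-time partition (exact strings /
-- numeric address intervals) and a single-pass dotted-quad scanner; objective: alternative.

-- ===== PORT A =====

-- str.split(sep) on a char list (exact for one-char separators)
def pvSplitCh (sep : Char) : List Char → List (List Char)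
  | [] => [[]]
  | c :: rest =>
      let r := pvSplitCh sep rest
      if c = sep then [] :: r
      else
        match r with
        | [] => [[c]]
        | h :: t => (c :: h) :: t

-- one dotted-quad octet as ipaddress._parse_octet checks it: 1–3 ASCII digits,
-- no leading zero (Python ≥ 3.9.5), value ≤ 255
def parseOctet? (cs : List Char) : Option Nat :=
  if cs.length = 0 ∨ 3 < cs.length then none
  else if ¬ cs.all Char.isDigit then none
  else if 1 < cs.length ∧ cs.head? = some '0' then none
  else
    let n := cs.foldl (fun a c => a * 10 + (c.toNat - 48)) 0
    if n ≤ 255 then some n else none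

-- ipaddress.ip_address(s) as a 32-bit value. Exact for this task: a valid IPv6 string
-- parses in Python but can never equal a trusted IPv4 string nor lie in an IPv4 network
-- (version-mismatched `in` is False), so modelling it as `none` gives the same result.
def pyIPv4? (s : String) : Option Nat :=
  match (pvSplitCh '.' s.toList).mapM parseOctet? with
  | some [a, b, c, d] => some (((a * 256 + b) * 256 + c) * 256 + d)
  | _ => none

-- `addr_obj in network(base, prefix)`
def netMatch (v base p : Nat) : Bool := v / 2 ^ (32 - p) = base / 2 ^ (32 - p)

-- ipaddress.ip_network(s, strict=False) for "a.b.c.d/p" (only applied to the two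
-- literal trusted CIDR strings, whose prefixes are valid)
def parseNet? (s : String) : Option (Nat × Nat) :=
  match pvSplitCh '/' s.toList with
  | [a, p] =>
      match pyIPv4? (String.ofList a), parseOctet? p with
      | some base, some pref => if pref ≤ 32 then some (base, pref) else none
      | _, _ => none
  | _ => none

-- Python iterates TRUSTED_IPS in set (hash) order; the loop only early-returns True,
-- so the result is order-independent and a fixed list order is exact.
def trustedIPs : List String :=
  ["192.168.1.1", "192.168.1.100", "127.0.0.1", "192.168.0.0/16", "10.0.0.0/8"]

def aLoop (ip : String) (v : Nat) : List String → Bool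
  | [] => false
  | t :: rest =>
      if t.toList.contains '/' then
        match parseNet? t with
        | some (b, p) => if netMatch v b p then true else aLoop ip v rest
        | none => false  -- ip_network raising ValueError is caught: whole call returns False
      else
        if ip = t then true else aLoop ip v rest

def is_trusted_ip (ip : String) : Bool :=
  match pyIPv4? ip with
  | none => false  -- except ValueError: return False
  | some v => aLoop ip v trustedIPs

-- ===== PORT B =====

-- B's _oct: octet text -> value, by B's branch structure
def octB? (cs : List Char) : Option Nat :=
  if cs = ['0'] then some 0
  else if (1 ≤ cs.length ∧ cs.length ≤ 3) ∧ cs.head? ≠ some '0' ∧ cs.all Char.isDigit then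
    let n := cs.foldl (fun a c => a * 10 + (c.toNat - 48)) 0  -- int(s)
    if n ≤ 255 then some n else none
  else none

-- B's _ipv4_int loop: one pass, state = (pending octet text, octets done, value so far)
def scanGo : List Char → List Char → Nat → Nat → Option Nat
  | [], cur, k, v =>
      match octB? cur with
      | some n => if k = 3 then some (v * 256 + n) else none
      | none => none
  | c :: rest, cur, k, v =>
      if c = '.' then
        match octB? cur with
        | some n => if k < 3 then scanGo rest [] (k + 1) (v * 256 + n) else none
        | none => none
      else scanGo rest (cur ++ [c]) k v

def ipv4Scan (s : String) : Option Nat := scanGo s.toList [] 0 0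

-- s.partition('/') (first two components)
def splitSlash : List Char → List Char × List Char
  | [] => ([], [])
  | c :: rest =>
      if c = '/' then ([], rest)
      else
        let (a, b) := splitSlash rest
        (c :: a, b)

-- B's _cidr_range: only applied to the two trusted CIDR literals, which always parse
def cidrRange (s : String) : Nat × Nat :=
  let (a, p) := splitSlash s.toList
  let plen := ((PySem.Int.ofStr? (String.ofList p)).getD 0).toNat
  let size := 2 ^ (32 - plen)
  let lo0 := (scanGo a [] 0 0).getD 0
  let lo := lo0 - lo0 % size
  (lo, lo + size - 1)

-- partition done once at load (over the same module constant TRUSTED_IPS)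
def exactIPs : PySem.Set String :=
  PySem.Set.ofList (trustedIPs.filter (fun s => ¬ s.toList.contains '/'))

def rangesB : List (Nat × Nat) :=
  (trustedIPs.filter (fun s => s.toList.contains '/')).map cidrRange

def is_trusted_ip_alt (ip : String) : Bool :=
  match ipv4Scan ip with
  | none => false
  | some v =>
      PySem.Set.contains exactIPs ip
        || rangesB.any (fun r => decide (r.1 ≤ v ∧ v ≤ r.2))

-- ===== PRECONDITION & SPEC =====
def Spec_is_trusted_ip (ip : String) (out : Bool) : Prop := out = is_trusted_ip_alt ip
instance (ip : String) (out : Bool) : Decidable (Spec_is_trusted_ip ip out) := by unfold Spec_is_trusted_ip; infer_instance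

-- ===== CLAIM (what is proved, stated in full; the proofs are below) =====
def Claim_equal_is_trusted_ip : Prop := ∀ (ip : String), Dom_is_trusted_ip ip → Spec_is_trusted_ip ip (is_trusted_ip ip)

-- ===== LEMMAS AND PROOFS =====

-- B's octet parser computes exactly A's
theorem octB_eq (cs : List Char) : octB? cs = parseOctet? cs := by
  unfold octB? parseOctet?
  by_cases h0 : cs = ['0']
  · subst h0; decide
  · simp only [h0, if_false]
    rcases cs with _ | ⟨a, rest⟩
    · simp
    · by_cases hd : a = '0'
      · subst hd
        rcases rest with _ | ⟨b, t⟩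
        · exact absurd rfl h0
        · simp only [List.length_cons, List.head?_cons]
          split_ifs <;> first | rfl | omega | (exfalso; simp_all) | (exfalso; omega)
      · by_cases hl : rest.length ≤ 2
        · by_cases hdg : (a :: rest).all Char.isDigit
          · simp only [hdg, List.length_cons, List.foldl_cons, Nat.zero_mul, Nat.zero_add]
            split_ifs <;> first | rfl | omega | (exfalso; omega) | (simp_all; omega) | simp_all
          · simp only [hdg, List.length_cons]
            split_ifs <;> first | rfl | omega | (exfalso; omega) | (simp_all; omega) | simp_all
        · simp only [List.length_cons]
          split_ifs <;> first | rfl | omega | (exfalso; omega) | (simp_all; omega) | simp_all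

theorem pvSplitCh_ne_nil (sep : Char) (cs : List Char) : pvSplitCh sep cs ≠ [] := by
  induction cs with
  | nil => simp [pvSplitCh]
  | cons c rest ih =>
      unfold pvSplitCh
      by_cases h : c = sep
      · simp [h]
      · simp only [h, if_false]
        cases hr : pvSplitCh sep rest with
        | nil => simp
        | cons a b => simp

-- head-completed segment list
def consHead (cur : List Char) : List (List Char) → List (List Char)
  | [] => [cur]
  | h :: t => (cur ++ h) :: t

-- what A's split-then-mapM computes, parametrised by the scanner's state
def combineA (v k : Nat) (segs : List (List Char)) : Option Nat :=
  match segs.mapM parseOctet? with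
  | some ns => if k + segs.length = 4 then some (ns.foldl (fun a n => a * 256 + n) v) else none
  | none => none

theorem combineA_cons (v k : Nat) (s : List Char) (segs : List (List Char)) (hne : segs ≠ []) :
    combineA v k (s :: segs) =
      match parseOctet? s with
      | some n => if k < 3 then combineA (v * 256 + n) (k + 1) segs else none
      | none => none := by
  unfold combineA
  cases hs : parseOctet? s with
  | none => simp [List.mapM_cons, hs]
  | some n =>
      cases hm : segs.mapM parseOctet? with
      | none => simp [List.mapM_cons, hs, hm]
      | some ns =>
          have hlen : 0 < segs.length := List.length_pos_iff.mpr hne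
          simp only [List.mapM_cons, hs, hm, Option.bind_eq_bind, Option.bind_some,
            Option.pure_def, List.length_cons, List.foldl_cons]
          by_cases hk : k < 3
          · by_cases h4 : k + 1 + segs.length = 4
            · have hx : k + (segs.length + 1) = 4 := by omega
              simp [hk, h4, hx]
            · have hx : ¬ (k + (segs.length + 1) = 4) := by omega
              simp [hk, h4, hx]
          · have hx : ¬ (k + (segs.length + 1) = 4) := by omega
            simp [hk, hx]

theorem scanGo_eq (cs : List Char) : ∀ (cur : List Char) (k v : Nat),
    scanGo cs cur k v = combineA v k (consHead cur (pvSplitCh '.' cs)) := by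
  induction cs with
  | nil =>
      intro cur k v
      simp only [scanGo, pvSplitCh, consHead, List.append_nil, octB_eq]
      unfold combineA
      cases h : parseOctet? cur with
      | none => simp [List.mapM_cons, h]
      | some n =>
          simp only [List.mapM_cons, List.mapM_nil, h, Option.bind_eq_bind, Option.bind_some,
            Option.pure_def, List.length_cons, List.length_nil, List.foldl_cons, List.foldl_nil]
          by_cases hk : k = 3
          · have hx : 0 + 1 + k = 4 := by omega
            simp [hk, hx, Nat.add_comm]
          · have hx : ¬ (k + (0 + 1) = 4) := by omega
            simp [hk, hx]
  | cons c rest ih =>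
      intro cur k v
      unfold scanGo pvSplitCh
      by_cases hc : c = '.'
      · simp only [hc, if_true, octB_eq]
        have hne := pvSplitCh_ne_nil '.' rest
        cases hr : pvSplitCh '.' rest with
        | nil => exact absurd hr hne
        | cons h t =>
            have hch : consHead cur ([] :: h :: t) = cur :: h :: t := by simp [consHead]
            rw [hch, combineA_cons v k cur (h :: t) (by simp)]
            cases hp : parseOctet? cur with
            | none => rfl
            | some n =>
                by_cases hk : k < 3
                · simp only [hk, if_true]
                  rw [ih [] (k + 1) (v * 256 + n), hr]
                  simp [consHead]
                · simp [hk]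
      · simp only [hc, if_false]
        rw [ih (cur ++ [c]) k v]
        have hne := pvSplitCh_ne_nil '.' rest
        cases hr : pvSplitCh '.' rest with
        | nil => exact absurd hr hne
        | cons h t => simp [consHead, List.append_assoc]

theorem mapM_length {segs : List (List Char)} {ns : List Nat}
    (h : segs.mapM parseOctet? = some ns) : ns.length = segs.length := by
  induction segs generalizing ns with
  | nil => simp [List.mapM_nil] at h; simp [← h]
  | cons s t ih =>
      rw [List.mapM_cons] at h
      cases hs : parseOctet? s with
      | none => simp [hs] at h
      | some n =>
          cases ht : t.mapM parseOctet? with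
          | none => simp [hs, ht] at h
          | some ms =>
              simp only [hs, ht, Option.bind_eq_bind, Option.bind_some, Option.pure_def,
                Option.some_inj] at h
              simp [← h, ih ht]

theorem pyIPv4_eq_scan (s : String) : pyIPv4? s = ipv4Scan s := by
  unfold pyIPv4? ipv4Scan
  rw [scanGo_eq]
  have hne := pvSplitCh_ne_nil '.' s.toList
  cases hr : pvSplitCh '.' s.toList with
  | nil => exact absurd hr hne
  | cons h t =>
      have : consHead [] (h :: t) = h :: t := by simp [consHead]
      rw [this]
      unfold combineA
      cases hm : (h :: t).mapM parseOctet? with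
      | none => rfl
      | some ns =>
          have hlen := mapM_length hm
          by_cases h4 : (h :: t).length = 4
          · rw [h4] at hlen
            match ns, hlen with
            | [a, b, c, d], _ => simp [h4, List.foldl_cons]
          · match ns, hlen with
            | [], hlen => exact absurd hlen (by simp)
            | [a], hlen => simp only [List.length_cons, List.length_nil] at hlen; simp [h4]; omega
            | [a, b], hlen => simp only [List.length_cons, List.length_nil] at hlen; simp [h4]; omega
            | [a, b, c], hlen => simp only [List.length_cons, List.length_nil] at hlen; simp [h4]; omega
            | [a, b, c, d], hlen => exact absurd hlen.symm h4
            | a :: b :: c :: d :: e :: r, hlen => simp only [List.length_cons, List.length_nil] at hlen; simp [h4]; omega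

theorem aLoop_eval (ip : String) (v : Nat) :
    aLoop ip v trustedIPs =
      (decide (ip = "192.168.1.1") || decide (ip = "192.168.1.100") || decide (ip = "127.0.0.1")
        || netMatch v 3232235520 16 || netMatch v 167772160 8) := by
  have h1 : ("192.168.1.1".toList.contains '/') = false := by decide
  have h2 : ("192.168.1.100".toList.contains '/') = false := by decide
  have h3 : ("127.0.0.1".toList.contains '/') = false := by decide
  have h4 : ("192.168.0.0/16".toList.contains '/') = true := by decide
  have h5 : ("10.0.0.0/8".toList.contains '/') = true := by decide
  have n1 : parseNet? "192.168.0.0/16" = some (3232235520, 16) := by decide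
  have n2 : parseNet? "10.0.0.0/8" = some (167772160, 8) := by decide
  simp only [trustedIPs, aLoop, h1, h2, h3, h4, h5, n1, n2, Bool.false_eq_true, if_false]
  by_cases e1 : ip = "192.168.1.1" <;> by_cases e2 : ip = "192.168.1.100" <;>
    by_cases e3 : ip = "127.0.0.1" <;>
    simp [e1, e2, e3]

theorem contains_eval (ip : String) :
    PySem.Set.contains exactIPs ip =
      (decide (ip = "192.168.1.1") || decide (ip = "192.168.1.100") || decide (ip = "127.0.0.1")) := by
  have he : exactIPs = ["192.168.1.1", "192.168.1.100", "127.0.0.1"] := by decide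
  simp only [he, PySem.Set.contains]
  by_cases e1 : ip = "192.168.1.1" <;> by_cases e2 : ip = "192.168.1.100" <;>
    by_cases e3 : ip = "127.0.0.1" <;> simp [e1, e2, e3]

theorem net16 (v : Nat) :
    netMatch v 3232235520 16 = decide (3232235520 ≤ v ∧ v ≤ 3232301055) := by
  unfold netMatch
  rw [decide_eq_decide]
  norm_num
  omega

theorem net8 (v : Nat) :
    netMatch v 167772160 8 = decide (167772160 ≤ v ∧ v ≤ 184549375) := by
  unfold netMatch
  rw [decide_eq_decide]
  norm_num
  omega

-- ===== VERDICT (by name: the statement is the Claim_ definition above) =====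
theorem is_trusted_ip_spec : Claim_equal_is_trusted_ip := by
  intro ip _
  unfold Spec_is_trusted_ip is_trusted_ip is_trusted_ip_alt
  rw [← pyIPv4_eq_scan]
  cases h : pyIPv4? ip with
  | none => rfl
  | some v =>
      have hr : rangesB = [(3232235520, 3232301055), (167772160, 184549375)] := by decide
      show aLoop ip v trustedIPs = _
      rw [aLoop_eval, contains_eval, hr, net16, net8]
      simp [List.any, Bool.or_assoc]
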